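-- pv_equiv track=rewrite | github.com/rgerum/flatmap_viewer | plot_clean.py | get_bit_lookout
-- ===== SOURCE A (Python) =====
-- def get_bit_lookout(subject_ids, min_subject_overlap_count):
--     def count_bits(number, positions):
--         count = 0
--         for position in positions:
--             if (number & (1 << position)) != 0:
--                 count += 1
--         return count
--
--     bit_count_table = [count_bits(i, subject_ids) >= min_subject_overlap_count for i in range(256)]
--     return bit_count_table
-- ===== SOURCE B (Python) =====
-- def get_bit_lookout(subject_ids, min_subject_overlap_count):
--     # Only bit positions 0..7 can be set in a number 0..255, so count each
--     # relevant position's multiplicity once, then build the 256-entry count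
--     # table by subset-sum doubling: one doubling step per bit.
--     mult = [subject_ids.count(b) for b in range(8)]
--     table = [0]
--     for b in range(8):
--         table = table + [c + mult[b] for c in table]
--     return [c >= min_subject_overlap_count for c in table]
-- ===== Notes on version B (the rewrite author's own statement) =====
-- stated objective: faster
-- what changed: Replaces the 256x n popcount scan by counting the multiplicity of each of the 8 relevant bit positions once and then building the 256-entry count table by subset-sum doubling (table = table ++ [c+mult[b] for c in table] per bit), thresholding at the end.
import Mathlib
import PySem

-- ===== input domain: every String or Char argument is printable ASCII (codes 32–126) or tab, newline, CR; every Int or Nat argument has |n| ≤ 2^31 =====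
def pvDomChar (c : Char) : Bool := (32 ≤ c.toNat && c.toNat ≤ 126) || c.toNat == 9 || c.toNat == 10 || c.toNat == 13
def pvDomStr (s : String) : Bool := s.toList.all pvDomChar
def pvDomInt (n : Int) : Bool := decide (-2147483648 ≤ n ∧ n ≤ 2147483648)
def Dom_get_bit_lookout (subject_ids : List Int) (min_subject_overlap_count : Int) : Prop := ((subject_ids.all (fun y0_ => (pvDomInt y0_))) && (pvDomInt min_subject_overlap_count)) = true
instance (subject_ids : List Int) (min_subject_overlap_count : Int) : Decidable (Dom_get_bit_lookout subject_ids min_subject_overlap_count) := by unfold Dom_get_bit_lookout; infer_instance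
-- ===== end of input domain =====

-- B replaces A's 256×n popcount scan by counting the multiplicity of each of the 8 relevant
-- bit positions once and building the 256-entry count table by subset-sum doubling.

-- ===== PORT A =====
-- A's inner helper count_bits: scan positions, count set bits of `number`.
def bitStep (number : Int) (count : Int) (position : Int) : Int :=
  if Int.land number ((1 : Int) <<< position.toNat) ≠ 0 then count + 1 else count

def count_bits (number : Int) (positions : List Int) : Int :=
  positions.foldl (bitStep number) 0

def get_bit_lookout (subject_ids : List Int) (min_subject_overlap_count : Int) : List Bool :=
  (List.range 256).map
    (fun (i : Nat) => decide (count_bits (i : Int) subject_ids ≥ min_subject_overlap_count))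

-- ===== PORT B =====
-- mult = [subject_ids.count(b) for b in range(8)]
-- for b in range(8): table = table + [c + mult[b] for c in table]
def alt_mult (subject_ids : List Int) : List Int :=
  (List.range 8).map (fun (b : Nat) => (PySem.List.count subject_ids (b : Int) : Int))

def get_bit_lookout_alt (subject_ids : List Int) (min_subject_overlap_count : Int) : List Bool :=
  ((List.range 8).foldl
      (fun table b => table ++ table.map (fun c => c + (alt_mult subject_ids).getD b 0)) [0]).map
    (fun c => decide (c ≥ min_subject_overlap_count))

-- ===== PRECONDITION & SPEC =====
-- Pre_ excludes lists with a negative id: `1 << position` raises ValueError in A there.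
def Pre_get_bit_lookout (subject_ids : List Int) (min_subject_overlap_count : Int) : Prop :=
  subject_ids.all (fun x => decide (0 ≤ x)) = true
instance (subject_ids : List Int) (min_subject_overlap_count : Int) : Decidable (Pre_get_bit_lookout subject_ids min_subject_overlap_count) := by unfold Pre_get_bit_lookout; infer_instance

def pvWitness_get_bit_lookout : List Int × Int := ([0, 2, 2, 9], 2)

def Spec_get_bit_lookout (subject_ids : List Int) (min_subject_overlap_count : Int) (out : List Bool) : Prop := out = get_bit_lookout_alt subject_ids min_subject_overlap_count
instance (subject_ids : List Int) (min_subject_overlap_count : Int) (out : List Bool) : Decidable (Spec_get_bit_lookout subject_ids min_subject_overlap_count out) := by unfold Spec_get_bit_lookout; infer_instance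

-- ===== CLAIM (what is proved, stated in full; the proofs are below) =====
def Claim_equal_get_bit_lookout : Prop := ∀ (subject_ids : List Int) (min_subject_overlap_count : Int), Dom_get_bit_lookout subject_ids min_subject_overlap_count → Pre_get_bit_lookout subject_ids min_subject_overlap_count → Spec_get_bit_lookout subject_ids min_subject_overlap_count (get_bit_lookout subject_ids min_subject_overlap_count)

-- ===== LEMMAS AND PROOFS =====

-- the per-i count as a sum over the 8 low bit positions
def bitSum (ids : List Int) (i : Nat) : Int :=
  ∑ b ∈ Finset.range 8, (if i.testBit b then ((ids.count (b : Int)) : Int) else 0)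

theorem count_bits_acc (positions : List Int) (number a : Int) :
    positions.foldl (bitStep number) a = a + count_bits number positions := by
  induction positions generalizing a with
  | nil => simp [count_bits]
  | cons p ps ih =>
    simp only [count_bits, List.foldl_cons]
    rw [ih, ih]
    unfold bitStep
    split_ifs <;> ring

theorem count_bits_cons (number p : Int) (ps : List Int) :
    count_bits number (p :: ps) = bitStep number 0 p + count_bits number ps := by
  simp only [count_bits, List.foldl_cons]
  rw [count_bits_acc]
  rfl

-- A's bit test, for a natural number and a nonnegative position, is Nat.testBit
theorem land_ne_iff_testBit (i : Nat) (n : Nat) :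
    (Int.land (i : Int) ((1 : Int) <<< n) ≠ 0) ↔ i.testBit n := by
  have h1 : ((1 : Int) <<< n) = (((2 ^ n : Nat)) : Int) := by
    rw [Int.shiftLeft_eq]; push_cast; ring
  have h2 : Int.land (i : Int) (((2 ^ n : Nat)) : Int) = ((i &&& 2 ^ n : Nat) : Int) := by
    exact_mod_cast rfl
  rw [h1, h2, Ne, Int.natCast_eq_zero]
  constructor
  · intro h
    cases hb : i.testBit n
    · exfalso
      apply h
      rw [Nat.and_two_pow, hb]
      simp
    · rfl
  · intro h hz
    rw [Nat.and_two_pow, h] at hz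
    simp at hz

theorem count_bits_eq_bitSum (ids : List Int) (h : ∀ x ∈ ids, 0 ≤ x) (i : Nat) (hi : i < 256) :
    count_bits (i : Int) ids = bitSum ids i := by
  induction ids with
  | nil => simp [count_bits, bitSum]
  | cons p ps ih =>
    have hp : 0 ≤ p := h p (by simp)
    have hps : ∀ x ∈ ps, 0 ≤ x := fun x hx => h x (by simp [hx])
    rw [count_bits_cons, ih hps]
    have hcount : ∀ b : Nat, (((p :: ps).count (b : Int)) : Int)
        = ((ps.count (b : Int)) : Int) + (if p = (b : Int) then 1 else 0) := by
      intro b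
      rw [List.count_cons]
      push_cast
      simp only [beq_iff_eq]
    unfold bitSum
    have hsplit : (∑ b ∈ Finset.range 8, (if i.testBit b then (((p :: ps).count (b : Int)) : Int) else 0))
        = (∑ b ∈ Finset.range 8, (if i.testBit b then ((ps.count (b : Int)) : Int) else 0))
          + (∑ b ∈ Finset.range 8, (if i.testBit b then (if p = (b : Int) then (1 : Int) else 0) else 0)) := by
      rw [← Finset.sum_add_distrib]
      apply Finset.sum_congr rfl
      intro b _
      rw [hcount b]
      split_ifs <;> ring
    rw [hsplit]
    have hcorr : (∑ b ∈ Finset.range 8, (if i.testBit b then (if p = (b : Int) then (1 : Int) else 0) else 0))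
        = bitStep (i : Int) 0 p := by
      unfold bitStep
      by_cases hc : p < 8
      · have ht : p = (p.toNat : Int) := (Int.toNat_of_nonneg hp).symm
        have htn : p.toNat < 8 := by omega
        have : (∑ b ∈ Finset.range 8, (if i.testBit b then (if p = (b : Int) then (1 : Int) else 0) else 0))
            = ∑ b ∈ Finset.range 8, (if b = p.toNat then (if i.testBit p.toNat then (1 : Int) else 0) else 0) := by
          apply Finset.sum_congr rfl
          intro b _
          by_cases hb : b = p.toNat
          · subst hb
            simp [← ht]
          · have : p ≠ (b : Int) := by omega
            simp [this, hb]
        rw [this, Finset.sum_ite_eq' (Finset.range 8) p.toNat]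
        simp only [Finset.mem_range, htn, if_true]
        rcases (Decidable.em (i.testBit p.toNat)) with hbit | hbit
        · simp [hbit, (land_ne_iff_testBit i p.toNat).mpr hbit]
        · have : ¬ (Int.land (i : Int) ((1 : Int) <<< p.toNat) ≠ 0) := by
            intro hx; exact hbit ((land_ne_iff_testBit i p.toNat).mp hx)
          simp [hbit, this]
      · -- p ≥ 8: no bit of i < 256 can be at position p, and no b < 8 equals p
        have h8 : 8 ≤ p.toNat := by omega
        have hbit : i.testBit p.toNat = false := by
          apply Nat.testBit_lt_two_pow
          calc i < 256 := hi
            _ = 2 ^ 8 := by norm_num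
            _ ≤ 2 ^ p.toNat := Nat.pow_le_pow_right (by norm_num) h8
        have hland : ¬ (Int.land (i : Int) ((1 : Int) <<< p.toNat) ≠ 0) := by
          intro hx
          have := (land_ne_iff_testBit i p.toNat).mp hx
          rw [hbit] at this; exact absurd this (by simp)
        rw [if_neg hland]
        apply Finset.sum_eq_zero
        intro b hb
        simp only [Finset.mem_range] at hb
        have : p ≠ (b : Int) := by omega
        simp [this]
    rw [hcorr]
    ring

-- B's doubling loop builds exactly the table of partial bit sums
theorem table_doubling (mult : List Int) (k : Nat) :
    (List.range k).foldl (fun table b => table ++ table.map (fun c => c + mult.getD b 0)) [0]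
      = (List.range (2 ^ k)).map
          (fun i => ∑ b ∈ Finset.range k, (if i.testBit b then mult.getD b 0 else 0)) := by
  induction k with
  | zero =>
    simp
  | succ k ih =>
    rw [List.range_succ, List.foldl_append, ih]
    simp only [List.foldl_cons, List.foldl_nil]
    have hsplit : (2 : Nat) ^ (k + 1) = 2 ^ k + 2 ^ k := by ring
    rw [hsplit, List.range_add, List.map_append, List.map_map]
    congr 1
    · apply List.map_congr_left
      intro i hi
      simp only [List.mem_range] at hi
      rw [Finset.sum_range_succ]
      have : i.testBit k = false := Nat.testBit_lt_two_pow hi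
      simp [this]
    · rw [List.map_map]
      apply List.map_congr_left
      intro i hi
      simp only [List.mem_range] at hi
      simp only [Function.comp]
      rw [Finset.sum_range_succ]
      have hk : (2 ^ k + i).testBit k = true := by
        rw [Nat.testBit_two_pow_add_eq, Nat.testBit_lt_two_pow hi]
        rfl
      have hlow : ∀ b < k, (2 ^ k + i).testBit b = i.testBit b := by
        intro b hb
        exact Nat.testBit_two_pow_add_gt hb i
      rw [hk]
      simp only [if_true]
      have : (∑ b ∈ Finset.range k, (if (2 ^ k + i).testBit b then mult.getD b 0 else 0))
          = ∑ b ∈ Finset.range k, (if i.testBit b then mult.getD b 0 else 0) := by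
        apply Finset.sum_congr rfl
        intro b hb
        rw [hlow b (Finset.mem_range.mp hb)]
      rw [this]

-- ===== VERDICT (by name: the statement is the Claim_ definition above) =====
theorem get_bit_lookout_spec : Claim_equal_get_bit_lookout := by
  intro ids m _ hpre
  have hids : ∀ x ∈ ids, 0 ≤ x := by simpa [Pre_get_bit_lookout] using hpre
  unfold Spec_get_bit_lookout get_bit_lookout get_bit_lookout_alt
  rw [table_doubling (alt_mult ids) 8]
  have h256 : (2 : Nat) ^ 8 = 256 := by norm_num
  rw [h256, List.map_map]
  apply List.map_congr_left
  intro i hi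
  simp only [List.mem_range] at hi
  simp only [Function.comp]
  rw [count_bits_eq_bitSum ids hids i hi]
  have hsum : bitSum ids i
      = ∑ b ∈ Finset.range 8, (if i.testBit b then (alt_mult ids).getD b 0 else 0) := by
    unfold bitSum
    apply Finset.sum_congr rfl
    intro b hb
    simp only [Finset.mem_range] at hb
    have hg : (alt_mult ids).getD b 0 = (PySem.List.count ids (b : Int) : Int) := by
      unfold alt_mult
      simp [List.getD, List.getElem?_map, List.getElem?_range hb]
    rw [hg]
    try simp [PySem.List.count_eq]
  rw [hsum]
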